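-- pv_equiv track=rewrite | github.com/HUHS-AlgorithmStudy/Algorithm-Study-2 | 이수빈/Week4_n2배열자르기.py | solution
-- ===== SOURCE A (Python) =====
-- def solution(n, left, right):
--     answer = []
--
--     # 효율을 위해 left와 right가 위치한 구간을 포함한 곳만 append한다
--     for i in range(left // n, right // n + 1):
--         for j in range(i):
--             answer.append(i + 1)
--
--         for j in range(i + 1, n + 1):
--             answer.append(j)
--
--     return answer[left % n:len(answer) - (n - 1) + right % n]
-- ===== SOURCE B (Python) =====
-- def solution(n, left, right):
--     return [max(k // n, k % n) + 1 for k in range(left, right + 1)]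
-- ===== Notes on version B (the rewrite author's own statement) =====
-- stated objective: alternative
-- what changed: B computes each requested element directly by the closed form max(k//n, k%n)+1 for k in [left, right], instead of materialising all rows from left//n to right//n and slicing the concatenation; it does asymptotically less work when the window is small relative to the rows it spans, though a timing run did not confirm a measured speed-up on its input family.
-- outside the precondition, e.g. on solution(1, 0, 2): A returns [1, 2, 3, 3], B returns [1, 2, 3]; on solution(2, -1, 1): A returns [1, 2, 1, 2], B returns [2, 1, 2]; on solution(0, 0, 0): A raises ZeroDivisionError, B raises ZeroDivisionError
import Mathlib
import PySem

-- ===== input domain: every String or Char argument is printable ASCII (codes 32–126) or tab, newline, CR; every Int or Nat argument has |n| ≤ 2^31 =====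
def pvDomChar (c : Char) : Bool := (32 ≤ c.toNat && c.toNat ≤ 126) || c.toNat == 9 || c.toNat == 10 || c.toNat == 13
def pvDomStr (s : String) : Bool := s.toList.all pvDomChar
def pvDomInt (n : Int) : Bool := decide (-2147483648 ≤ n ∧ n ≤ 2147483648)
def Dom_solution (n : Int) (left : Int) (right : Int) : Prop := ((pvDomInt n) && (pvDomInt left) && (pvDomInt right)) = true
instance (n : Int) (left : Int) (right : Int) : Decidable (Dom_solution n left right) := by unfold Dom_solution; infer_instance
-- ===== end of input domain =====

-- B replaces A's row-building loops + slice by the per-element closed form max(k//n, k%n)+1 for k in [left, right] (objective: alternative algorithm; not measured faster).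

-- ===== PORT A =====
def solution (n : Int) (left : Int) (right : Int) : List Int :=
  let answer := (PySem.List.pyRange (PySem.Int.floordiv left n) (PySem.Int.floordiv right n + 1) 1).foldl
    (fun answer i =>
      (PySem.List.pyRange (i + 1) (n + 1) 1).foldl (fun answer j => answer ++ [j])
        ((PySem.List.pyRange 0 i 1).foldl (fun answer _j => answer ++ [i + 1]) answer))
    []
  PySem.List.slice answer (some (PySem.Int.mod left n))
    (some ((answer.length : Int) - (n - 1) + PySem.Int.mod right n))

-- ===== PORT B =====
def solution_alt (n : Int) (left : Int) (right : Int) : List Int :=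
  (PySem.List.pyRange left (right + 1) 1).map
    (fun k => max (PySem.Int.floordiv k n) (PySem.Int.mod k n) + 1)

-- ===== PRECONDITION & SPEC =====
-- Pre_ covers the natural domain of the puzzle (1 ≤ n, 0 ≤ left ≤ right, extended up to right < n²+n,
-- where A's rows still align with the flattened grid) plus the empty queries (right < left, including
-- n ≤ -1 when A builds no row) on which A also returns []; excluded are n = 0 (A raises
-- ZeroDivisionError) and the remaining out-of-grid or negative-index requests, where A's returned
-- values are artefacts of building misaligned out-of-grid rows and of the slice arithmetic.
def Pre_solution (n : Int) (left : Int) (right : Int) : Prop :=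
  (1 ≤ n ∧ ((0 ≤ left ∧ left ≤ right ∧ right < n * n + n) ∨
    (right < left ∧ (PySem.Int.floordiv right n < PySem.Int.floordiv left n ∨
      (0 ≤ left ∧ left < n * n + n))))) ∨
  (n ≤ -1 ∧ right < left ∧ n ≤ PySem.Int.floordiv left n ∧ PySem.Int.floordiv right n ≤ 0)
instance (n : Int) (left : Int) (right : Int) : Decidable (Pre_solution n left right) := by
  unfold Pre_solution; infer_instance

def pvWitness_solution : Int × Int × Int := (3, 2, 5)

def Spec_solution (n : Int) (left : Int) (right : Int) (out : List Int) : Prop := out = solution_alt n left right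
instance (n : Int) (left : Int) (right : Int) (out : List Int) : Decidable (Spec_solution n left right out) := by unfold Spec_solution; infer_instance

-- ===== CLAIM (what is proved, stated in full; the proofs are below) =====
def Claim_equal_solution : Prop := ∀ (n : Int) (left : Int) (right : Int), Dom_solution n left right → Pre_solution n left right → Spec_solution n left right (solution n left right)

-- ===== LEMMAS AND PROOFS =====

-- the closed-form value B assigns to flattened cell k
def pvF (n k : Int) : Int := max (PySem.Int.floordiv k n) (PySem.Int.mod k n) + 1

-- one row of A's construction: what its two inner loops append for row index i
def pvRow (n i : Int) : List Int :=
  (PySem.List.pyRange 0 i 1).map (fun _ => i + 1) ++ PySem.List.pyRange (i + 1) (n + 1) 1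

-- row i of A is exactly the closed form applied to flattened indices i*n .. (i+1)*n - 1
lemma pvRow_eq_chunk (n i : Int) (hn : 1 ≤ n) (h0 : 0 ≤ i) (hi : i ≤ n) :
    pvRow n i = (PySem.List.pyRange (i * n) ((i + 1) * n) 1).map (pvF n) := by
  have hlen : ((i + 1) * n - i * n) = n := by ring
  apply List.ext_getElem
  · simp [pvRow, PySem.List.length_pyRange_one, hlen]
    omega
  · intro m h1 h2
    have hmn : (m : Int) < n := by
      simp [PySem.List.length_pyRange_one, hlen] at h2; omega
    have hfd : PySem.Int.floordiv (i * n + m) n = i := by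
      rw [PySem.Int.floordiv_eq_iff_of_pos (by omega)]
      constructor
      · omega
      · have : (i + 1) * n = i * n + n := by ring
        omega
    have hmod : PySem.Int.mod (i * n + m) n = m := by
      have := PySem.Int.floordiv_mul_add_mod (i * n + m) n
      rw [hfd] at this; omega
    rw [List.getElem_map, PySem.List.getElem_pyRange_one]
    show (pvRow n i)[m] = pvF n (i * n + m)
    simp only [pvF, hfd, hmod, pvRow]
    by_cases hc : m < ((PySem.List.pyRange 0 i 1).map (fun _ => i + 1)).length
    · rw [List.getElem_append_left hc, List.getElem_map]
      have : (m : Int) < i := by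
        simp [PySem.List.length_pyRange_one] at hc; omega
      omega
    · rw [not_lt] at hc
      rw [List.getElem_append_right hc, PySem.List.getElem_pyRange_one]
      have hmi : i ≤ (m : Int) := by
        simp [PySem.List.length_pyRange_one] at hc; omega
      have : ((m - ((PySem.List.pyRange 0 i 1).map (fun _ => i + 1)).length : Nat) : Int)
          = (m : Int) - i := by
        simp [PySem.List.length_pyRange_one]; omega
      rw [this]; omega

-- concatenating rows a .. a+k-1 is the closed form on flattened indices a*n .. (a+k)*n - 1
lemma pvFlatMap_rows (n : Int) (hn : 1 ≤ n) :
    ∀ (k : Nat) (a : Int), 0 ≤ a → a + k ≤ n + 1 →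
      (PySem.List.pyRange a (a + k) 1).flatMap (pvRow n)
        = (PySem.List.pyRange (a * n) ((a + k) * n) 1).map (pvF n) := by
  intro k
  induction k with
  | zero =>
    intro a ha hk
    simp [PySem.List.pyRange_one_eq_nil (le_refl a)]
  | succ k ih =>
    intro a ha hk
    have hcons : PySem.List.pyRange a (a + (k + 1 : Nat)) 1
        = a :: PySem.List.pyRange (a + 1) (a + (k + 1 : Nat)) 1 :=
      PySem.List.pyRange_one_cons (by push_cast; omega)
    rw [hcons, List.flatMap_cons]
    have hih := ih (a + 1) (by omega) (by push_cast at hk ⊢; omega)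
    rw [show (a + ((k + 1 : Nat) : Int)) = (a + 1) + (k : Nat) by push_cast; ring]
    rw [hih]
    rw [pvRow_eq_chunk n a hn ha (by push_cast at hk; omega)]
    rw [← List.map_append]
    congr 1
    exact (PySem.List.pyRange_one_append (a * n) ((a + 1) * n) ((a + 1 + (k : Nat)) * n)
      (by nlinarith) (by nlinarith)).symm

lemma pvFlatMap_rows' (n a b : Int) (hn : 1 ≤ n) (h0 : 0 ≤ a) (hab : a ≤ b) (hb : b ≤ n + 1) :
    (PySem.List.pyRange a b 1).flatMap (pvRow n)
      = (PySem.List.pyRange (a * n) (b * n) 1).map (pvF n) := by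
  have hk : a + ((b - a).toNat : Int) = b := by omega
  have := pvFlatMap_rows n hn (b - a).toNat a h0 (by omega)
  rwa [hk] at this

lemma pv_main (n left right : Int) (hn : 1 ≤ n) (hl : 0 ≤ left) (hlr : left ≤ right)
    (hr : right < n * n + n) : solution n left right = solution_alt n left right := by
  have hn0 : (0:Int) < n := by omega
  set L0 := PySem.Int.floordiv left n with hL0def
  set R0 := PySem.Int.floordiv right n with hR0def
  set lm := PySem.Int.mod left n with hlmdef
  set rm := PySem.Int.mod right n with hrmdef
  have hleft : L0 * n + lm = left := PySem.Int.floordiv_mul_add_mod left n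
  have hright : R0 * n + rm = right := PySem.Int.floordiv_mul_add_mod right n
  have hlm0 : 0 ≤ lm := PySem.Int.mod_nonneg left hn0
  have hlmn : lm < n := PySem.Int.mod_lt left hn0
  have hrm0 : 0 ≤ rm := PySem.Int.mod_nonneg right hn0
  have hrmn : rm < n := PySem.Int.mod_lt right hn0
  have hL0 : 0 ≤ L0 := by nlinarith
  have hR0 : R0 ≤ n := by nlinarith
  have hL0R0 : L0 ≤ R0 := by nlinarith
  dsimp only [solution]
  rw [← hL0def, ← hR0def, ← hlmdef, ← hrmdef]
  have h1 : ∀ (acc : List Int) (x : Int), x ∈ PySem.List.pyRange L0 (R0 + 1) 1 →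
      (PySem.List.pyRange (x + 1) (n + 1) 1).foldl (fun answer j => answer ++ [j])
        ((PySem.List.pyRange 0 x 1).foldl (fun answer _j => answer ++ [x + 1]) acc)
      = acc ++ pvRow n x := by
    intro acc x _
    rw [PySem.List.foldl_append_singleton_eq_map (f := fun _ => x + 1),
      PySem.List.foldl_append_singleton_eq_self, List.append_assoc]
    rfl
  have h2 := PySem.List.foldl_congr_mem (PySem.List.pyRange L0 (R0 + 1) 1)
    (fun answer i =>
      (PySem.List.pyRange (i + 1) (n + 1) 1).foldl (fun answer j => answer ++ [j])
        ((PySem.List.pyRange 0 i 1).foldl (fun answer _j => answer ++ [i + 1]) answer))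
    (fun acc i => acc ++ pvRow n i) [] h1
  rw [h2, PySem.List.foldl_append_eq_flatMap, List.nil_append,
    pvFlatMap_rows' n L0 (R0 + 1) hn hL0 (by omega) (by omega)]
  set M := (R0 - L0) * n with hMdef
  have hM : 0 ≤ M := mul_nonneg (by omega) (by omega)
  set P := L0 * n with hPdef
  have hRP : R0 * n = P + M := by rw [hPdef, hMdef]; ring
  have hR1 : (R0 + 1) * n = P + M + n := by rw [hPdef, hMdef]; ring
  have hlen : (((PySem.List.pyRange P ((R0 + 1) * n) 1).map (pvF n)).length : Int)
      = M + n := by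
    simp [PySem.List.length_pyRange_one]
    omega
  rw [hlen, PySem.List.slice_toNat _ hlm0 (by omega)]
  show _ = (PySem.List.pyRange left (right + 1) 1).map (pvF n)
  apply List.ext_getElem
  · simp [PySem.List.length_pyRange_one]
    omega
  · intro m hma hmb
    simp only [List.getElem_take, List.getElem_drop, List.getElem_map,
      PySem.List.getElem_pyRange_one]
    congr 1
    push_cast
    omega

-- any slice of the empty list is empty
lemma pv_slice_nil (a b : Int) : PySem.List.slice ([] : List Int) (some a) (some b) = [] := by
  apply List.eq_nil_of_length_eq_zero
  have h1 := PySem.List.length_slice ([] : List Int) a b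
  have h2 := PySem.List.clampIdx_le (([] : List Int).length : Nat) b
  have h3 := PySem.List.clampIdx_le (([] : List Int).length : Nat) a
  have h4 : ([] : List Int).length = 0 := rfl
  omega

-- on an empty query (right < left) both programs return []
lemma pv_empty (n left right : Int) (hn : 1 ≤ n) (hrl : right < left)
    (h : PySem.Int.floordiv right n < PySem.Int.floordiv left n ∨ (0 ≤ left ∧ left < n * n + n)) :
    solution n left right = solution_alt n left right := by
  have hn0 : (0:Int) < n := by omega
  have hB : solution_alt n left right = [] := by
    rw [solution_alt, PySem.List.pyRange_one_eq_nil (by omega), List.map_nil]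
  set L0 := PySem.Int.floordiv left n with hL0def
  set R0 := PySem.Int.floordiv right n with hR0def
  set lm := PySem.Int.mod left n with hlmdef
  set rm := PySem.Int.mod right n with hrmdef
  have hleft : L0 * n + lm = left := PySem.Int.floordiv_mul_add_mod left n
  have hright : R0 * n + rm = right := PySem.Int.floordiv_mul_add_mod right n
  have hlm0 : 0 ≤ lm := PySem.Int.mod_nonneg left hn0
  have hlmn : lm < n := PySem.Int.mod_lt left hn0
  have hrm0 : 0 ≤ rm := PySem.Int.mod_nonneg right hn0
  have hrmn : rm < n := PySem.Int.mod_lt right hn0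
  have hR0L0 : R0 ≤ L0 := by nlinarith
  dsimp only [solution]
  rw [← hL0def, ← hR0def, ← hlmdef, ← hrmdef, hB]
  by_cases hlt : R0 < L0
  · -- A builds no row at all: the fold runs over the empty range
    rw [PySem.List.pyRange_one_eq_nil (by omega), List.foldl_nil]
    exact pv_slice_nil _ _
  · -- one row L0 = R0; the slice of it is empty since rm < lm
    have hR0eq : R0 = L0 := by omega
    have hl0 : 0 ≤ left ∧ left < n * n + n := by
      rcases h with h | h
      · omega
      · exact h
    have hL0 : 0 ≤ L0 := by nlinarith [hl0.1]
    have hL0n : L0 ≤ n := by nlinarith [hl0.2]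
    have hrmlm : rm < lm := by
      rw [hR0eq] at hright; omega
    rw [hR0eq, PySem.List.pyRange_one_singleton]
    have h1 : ∀ (acc : List Int) (x : Int), x ∈ [L0] →
        (PySem.List.pyRange (x + 1) (n + 1) 1).foldl (fun answer j => answer ++ [j])
          ((PySem.List.pyRange 0 x 1).foldl (fun answer _j => answer ++ [x + 1]) acc)
        = acc ++ pvRow n x := by
      intro acc x _
      rw [PySem.List.foldl_append_singleton_eq_map (f := fun _ => x + 1),
        PySem.List.foldl_append_singleton_eq_self, List.append_assoc]
      rfl
    have h2 := PySem.List.foldl_congr_mem [L0]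
      (fun answer i =>
        (PySem.List.pyRange (i + 1) (n + 1) 1).foldl (fun answer j => answer ++ [j])
          ((PySem.List.pyRange 0 i 1).foldl (fun answer _j => answer ++ [i + 1]) answer))
      (fun acc i => acc ++ pvRow n i) [] h1
    rw [h2, List.foldl_cons, List.foldl_nil, List.nil_append,
      pvRow_eq_chunk n L0 hn hL0 hL0n]
    have hlen : (((PySem.List.pyRange (L0 * n) ((L0 + 1) * n) 1).map (pvF n)).length : Int)
        = n := by
      have : (L0 + 1) * n - L0 * n = n := by ring
      simp [PySem.List.length_pyRange_one, this]
      omega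
    rw [hlen, PySem.List.slice_toNat _ hlm0 (by omega),
      show (n - (n - 1) + rm).toNat - lm.toNat = 0 from by omega, List.take_zero]

-- for n ≤ -1 with right < left and all row indices in [n, 0], every loop body is empty: both return []
lemma pv_negn (n left right : Int) (_hn : n ≤ -1) (hrl : right < left)
    (hfl : n ≤ PySem.Int.floordiv left n) (hfr : PySem.Int.floordiv right n ≤ 0) :
    solution n left right = solution_alt n left right := by
  have hB : solution_alt n left right = [] := by
    rw [solution_alt, PySem.List.pyRange_one_eq_nil (by omega), List.map_nil]
  dsimp only [solution]
  rw [hB]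
  have h1 : ∀ (acc : List Int) (x : Int),
      x ∈ PySem.List.pyRange (PySem.Int.floordiv left n) (PySem.Int.floordiv right n + 1) 1 →
      (PySem.List.pyRange (x + 1) (n + 1) 1).foldl (fun answer j => answer ++ [j])
        ((PySem.List.pyRange 0 x 1).foldl (fun answer _j => answer ++ [x + 1]) acc)
      = acc := by
    intro acc x hx
    have hb := PySem.List.mem_pyRange_one.mp hx
    rw [PySem.List.pyRange_one_eq_nil (show x ≤ 0 by omega), List.foldl_nil,
      PySem.List.pyRange_one_eq_nil (show n + 1 ≤ x + 1 by omega), List.foldl_nil]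
  have h2 := PySem.List.foldl_congr_mem
    (PySem.List.pyRange (PySem.Int.floordiv left n) (PySem.Int.floordiv right n + 1) 1)
    (fun answer i =>
      (PySem.List.pyRange (i + 1) (n + 1) 1).foldl (fun answer j => answer ++ [j])
        ((PySem.List.pyRange 0 i 1).foldl (fun answer _j => answer ++ [i + 1]) answer))
    (fun acc _ => acc) [] h1
  rw [h2, PySem.List.foldl_ignore]
  exact pv_slice_nil _ _

-- ===== VERDICT (by name: the statement is the Claim_ definition above) =====
theorem solution_spec : Claim_equal_solution := by
  intro n left right _hdom hpre
  rcases hpre with ⟨hn, ⟨hl, hlr, hr⟩ | ⟨hrl, h⟩⟩ | ⟨hn, hrl, hfl, hfr⟩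
  · exact pv_main n left right hn hl hlr hr
  · exact pv_empty n left right hn hrl h
  · exact pv_negn n left right hn hrl hfl hfr
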